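-- pv_equiv track=rewrite | github.com/komajun365/competitive_programming | agc/agc043/b_temp.py | calc
-- ===== SOURCE A (Python) =====
-- def calc(a):
--     if(len(a) == 1):
--         return a[0]
--
--     tmp = abs(a[0] - a[-1])
--     if( tmp < 2):
--         return tmp
--     else:
--         if(calc(a[1:-1]) == 1):
--             return 0
--         else:
--             return 2
-- ===== SOURCE B (Python) =====
-- def calc(a):
--     # Two-pointer single pass from the outside in; no list slicing.
--     i, j = 0, len(a) - 1
--     while i < j:
--         tmp = abs(a[i] - a[j])
--         if tmp < 2:
--             v = tmp
--             break
--         i += 1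
--         j -= 1
--     else:
--         v = a[i]
--     if i == 0:
--         return v
--     if i == 1:
--         return 0 if v == 1 else 2
--     return 2
-- ===== Notes on version B (the rewrite author's own statement) =====
-- stated objective: faster
-- what changed: Replaced the recursion that copies a[1:-1] at every level by a single two-pointer pass from the outside in (no slicing), using the fact that once one outer level rejects, the propagated answer is determined by the depth of the first matching pair alone.
-- crash fix: On non-empty even-length lists all of whose outer pairs differ by at least 2, A recurses down to the empty list and raises IndexError, while B returns the value its pass computes (2, or 0 when the middle-crossing element equals 1); Pre_ excludes these inputs and the empty list (where both raise). — e.g. on calc([0, 5]): A raises IndexError, B returns 2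
import Mathlib
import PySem

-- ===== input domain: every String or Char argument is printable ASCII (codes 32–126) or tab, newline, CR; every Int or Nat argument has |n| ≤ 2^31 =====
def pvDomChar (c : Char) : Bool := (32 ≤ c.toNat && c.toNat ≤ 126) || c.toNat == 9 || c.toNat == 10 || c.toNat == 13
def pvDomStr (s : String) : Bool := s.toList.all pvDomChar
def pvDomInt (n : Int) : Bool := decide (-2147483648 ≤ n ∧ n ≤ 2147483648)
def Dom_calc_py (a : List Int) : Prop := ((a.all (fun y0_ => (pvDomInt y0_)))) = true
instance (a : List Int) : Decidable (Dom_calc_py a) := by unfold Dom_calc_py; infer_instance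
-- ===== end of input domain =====

-- B replaces A's slice-copying recursion by a single two-pointer pass from the outside in.

-- ===== PORT A =====
-- a[1:-1] as Python computes it (cited by the port's termination proof)
theorem pv_slice11 (l : List Int) :
    PySem.List.slice l (some 1) (some (-1)) = l.tail.dropLast := by
  cases l with
  | nil => decide
  | cons x xs =>
    simp [PySem.List.slice, PySem.List.clampIdx, List.dropLast_eq_take]
    rw [if_neg (by omega)]
    omega

def calc_py (a : List Int) : Int :=
  if _h1 : a.length = 1 then PySem.List.pyGetD a 0 0
  else
    if h2 : |PySem.List.pyGetD a 0 0 - PySem.List.pyGetD a (-1) 0| < 2 then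
      |PySem.List.pyGetD a 0 0 - PySem.List.pyGetD a (-1) 0|
    else
      if calc_py (PySem.List.slice a (some 1) (some (-1))) = 1 then 0 else 2
termination_by a.length
decreasing_by
  have ha : a ≠ [] := by rintro rfl; exact h2 (by decide)
  have h0 : 0 < a.length := List.length_pos_iff.mpr ha
  rw [pv_slice11]
  simp only [List.length_dropLast, List.length_tail]
  omega

-- ===== PORT B =====
-- the while loop of Source B: walks i upward and j downward until a close pair or the middle
def pvFind (a : List Int) (i j : Nat) : Nat × Int :=
  if _h : i < j then
    if |PySem.List.pyGetD a (i : Int) 0 - PySem.List.pyGetD a (j : Int) 0| < 2 then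
      (i, |PySem.List.pyGetD a (i : Int) 0 - PySem.List.pyGetD a (j : Int) 0|)
    else pvFind a (i + 1) (j - 1)
  else (i, PySem.List.pyGetD a (i : Int) 0)
termination_by j - i

def calc_py_alt (a : List Int) : Int :=
  let p := pvFind a 0 (a.length - 1)
  if p.1 = 0 then p.2
  else if p.1 = 1 then (if p.2 = 1 then 0 else 2)
  else 2

-- ===== PRECONDITION & SPEC =====
-- Pre_ excludes the empty list and the non-empty even-length lists whose outer pairs all
-- differ by ≥ 2: exactly the inputs on which the Python A raises IndexError.
def Pre_calc_py (a : List Int) : Prop :=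
  a ≠ [] ∧ (a.length % 2 = 1 ∨
    ∃ i < a.length / 2, |a.getD i 0 - a.getD (a.length - 1 - i) 0| < 2)
instance (a : List Int) : Decidable (Pre_calc_py a) := by unfold Pre_calc_py; infer_instance
def pvWitness_calc_py : List Int := [3]

-- On non-empty even-length lists all of whose outer pairs differ by at least 2, A recurses down
-- to the empty list and raises IndexError, while B's pass returns a value.
def Raises_calc_py (a : List Int) : Prop :=
  a ≠ [] ∧ a.length % 2 = 0 ∧
    ∀ i < a.length / 2, ¬ |a.getD i 0 - a.getD (a.length - 1 - i) 0| < 2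
instance (a : List Int) : Decidable (Raises_calc_py a) := by unfold Raises_calc_py; infer_instance
def pvRaiseWitness_calc_py : List Int := [0, 5]
def pvRaiseWitnessOut_calc_py : Int := 2

def Spec_calc_py (a : List Int) (out : Int) : Prop := out = calc_py_alt a
instance (a : List Int) (out : Int) : Decidable (Spec_calc_py a out) := by unfold Spec_calc_py; infer_instance

-- ===== CLAIM (what is proved, stated in full; the proofs are below) =====
def Claim_equal_calc_py : Prop := ∀ (a : List Int), Dom_calc_py a → Pre_calc_py a → Spec_calc_py a (calc_py a)
def Claim_raises_calc_py : Prop := (∀ (a : List Int), Dom_calc_py a → Raises_calc_py a → ¬ Pre_calc_py a) ∧ (Dom_calc_py (pvRaiseWitness_calc_py) ∧ Raises_calc_py (pvRaiseWitness_calc_py) ∧ calc_py_alt (pvRaiseWitness_calc_py) = pvRaiseWitnessOut_calc_py)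

-- ===== LEMMAS AND PROOFS =====

-- unfolding equations for the loop, kept in unsimplified form
theorem pvFind_stop (a : List Int) (i j : Nat) (h : ¬ i < j) :
    pvFind a i j = (i, PySem.List.pyGetD a (i : Int) 0) := by
  rw [pvFind, dif_neg h]

theorem pvFind_break (a : List Int) (i j : Nat) (h : i < j)
    (hc : |PySem.List.pyGetD a (i : Int) 0 - PySem.List.pyGetD a (j : Int) 0| < 2) :
    pvFind a i j = (i, |PySem.List.pyGetD a (i : Int) 0 - PySem.List.pyGetD a (j : Int) 0|) := by
  rw [pvFind, dif_pos h, if_pos hc]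

theorem pvFind_step (a : List Int) (i j : Nat) (h : i < j)
    (hc : ¬ |PySem.List.pyGetD a (i : Int) 0 - PySem.List.pyGetD a (j : Int) 0| < 2) :
    pvFind a i j = pvFind a (i + 1) (j - 1) := by
  rw [pvFind, dif_pos h, if_neg hc]

-- index bridges on the decomposed list x :: (m ++ [y])
theorem pv_getD_mid (x y : Int) (m : List Int) (i : Nat) (hi : i < m.length) :
    (x :: (m ++ [y])).getD (i + 1) 0 = m.getD i 0 := by
  rw [List.getD_cons_succ, List.getD_append _ _ _ _ hi]

theorem pv_getD_last (x y : Int) (m : List Int) :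
    (x :: (m ++ [y])).getD (m.length + 1) 0 = y := by
  rw [List.getD_cons_succ]
  simp [List.getD_eq_getElem?_getD]

theorem pv_pyGetD_mid (x y : Int) (m : List Int) (i : Nat) (hi : i < m.length) :
    PySem.List.pyGetD (x :: (m ++ [y])) ((i + 1 : Nat) : Int) 0 = m.getD i 0 := by
  rw [PySem.List.pyGetD_natCast]
  exact pv_getD_mid x y m i hi

-- shifting the two-pointer walk across the outer pair
theorem pv_shift (x y : Int) (m : List Int) :
    ∀ (n i j : Nat), j - i ≤ n → i + j + 1 = m.length →
      pvFind (x :: (m ++ [y])) (i + 1) (j + 1) = ((pvFind m i j).1 + 1, (pvFind m i j).2) := by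
  intro n
  induction n with
  | zero =>
    intro i j hle hlen
    have hij : ¬ i < j := by omega
    have hi : i < m.length := by omega
    rw [pvFind_stop _ _ _ hij, pvFind_stop _ _ _ (show ¬ i + 1 < j + 1 by omega)]
    rw [pv_pyGetD_mid x y m i hi, PySem.List.pyGetD_natCast]
  | succ n ih =>
    intro i j hle hlen
    by_cases hij : i < j
    · have hi : i < m.length := by omega
      have hj : j < m.length := by omega
      have gi := pv_pyGetD_mid x y m i hi
      have gj := pv_pyGetD_mid x y m j hj
      by_cases hc : |m.getD i 0 - m.getD j 0| < 2
      · rw [pvFind_break m i j hij (by rw [PySem.List.pyGetD_natCast, PySem.List.pyGetD_natCast]; exact hc)]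
        rw [pvFind_break _ (i + 1) (j + 1) (by omega) (by rw [gi, gj]; exact hc)]
        rw [gi, gj, PySem.List.pyGetD_natCast, PySem.List.pyGetD_natCast]
      · rw [pvFind_step m i j hij (by rw [PySem.List.pyGetD_natCast, PySem.List.pyGetD_natCast]; exact hc)]
        rw [pvFind_step _ (i + 1) (j + 1) (by omega) (by rw [gi, gj]; exact hc)]
        have e1 : j + 1 - 1 = (j - 1) + 1 := by omega
        rw [e1]
        exact ih (i + 1) (j - 1) (by omega) (by omega)
    · have hi : i < m.length := by omega
      rw [pvFind_stop _ _ _ hij, pvFind_stop _ _ _ (show ¬ i + 1 < j + 1 by omega)]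
      rw [pv_pyGetD_mid x y m i hi, PySem.List.pyGetD_natCast]

theorem pv_dispatch (m : List Int) (q : Nat × Int) (hq : pvFind m 0 (m.length - 1) = q) :
    (if calc_py_alt m = 1 then (0 : Int) else 2) =
    (if q.1 + 1 = 0 then q.2 else if q.1 + 1 = 1 then (if q.2 = 1 then (0 : Int) else 2) else 2) := by
  have hA : calc_py_alt m =
      if q.1 = 0 then q.2 else if q.1 = 1 then (if q.2 = 1 then (0 : Int) else 2) else 2 := by
    rw [calc_py_alt, hq]
  rw [hA]
  rcases q with ⟨k, v⟩
  by_cases hk0 : k = 0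
  · subst hk0; simp
  · by_cases hk1 : k = 1
    · subst hk1
      simp only [if_neg (by omega : ¬(1 : Nat) = 0),
        if_neg (by omega : ¬(1 : Nat) + 1 = 0), if_neg (by omega : ¬(1 : Nat) + 1 = 1)]
      by_cases hv : v = 1 <;> simp [hv]
    · simp only [if_neg hk0, if_neg hk1, if_neg (show ¬k + 1 = 0 by omega),
        if_neg (show ¬k + 1 = 1 by omega)]
      norm_num

theorem pv_main : ∀ (n : Nat) (a : List Int), a.length ≤ n → Pre_calc_py a → calc_py a = calc_py_alt a := by
  intro n
  induction n with
  | zero =>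
    intro a hlen hpre
    cases a with
    | nil => exact absurd rfl hpre.1
    | cons x l => simp at hlen
  | succ n ih =>
    intro a hlen hpre
    obtain ⟨hne, hparity⟩ := hpre
    cases a with
    | nil => exact absurd rfl hne
    | cons x l =>
    by_cases h1 : (x :: l).length = 1
    · have hl0 : l = [] := by
        cases l with
        | nil => rfl
        | cons z zs => simp at h1
      subst hl0
      rw [calc_py]
      simp [calc_py_alt, pvFind, PySem.List.pyGetD_zero_cons]
    · -- l nonempty; decompose l = m ++ [y]
      have hl : l ≠ [] := by rintro rfl; exact h1 rfl
      obtain ⟨m, y, rfl⟩ : ∃ m y, l = m ++ [y] :=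
        ⟨l.dropLast, l.getLast hl, (List.dropLast_append_getLast hl).symm⟩
      have hlenA : (x :: (m ++ [y])).length = m.length + 2 := by simp
      have hx0 : PySem.List.pyGetD (x :: (m ++ [y])) 0 0 = x :=
        PySem.List.pyGetD_zero_cons x (m ++ [y]) 0
      have hylast : PySem.List.pyGetD (x :: (m ++ [y])) (-1) 0 = y := by
      -- x :: (m ++ [y]) = (x :: m) ++ [y]
        rw [← List.cons_append]
        exact PySem.List.pyGetD_neg_one_append_singleton (x :: m) y 0
      -- outer-pair values as seen by the B loop
      have g0 : PySem.List.pyGetD (x :: (m ++ [y])) ((0 : Nat) : Int) 0 = x := by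
        rw [PySem.List.pyGetD_natCast]; rfl
      have glast : PySem.List.pyGetD (x :: (m ++ [y])) ((m.length + 1 : Nat) : Int) 0 = y := by
        rw [PySem.List.pyGetD_natCast]; exact pv_getD_last x y m
      have hidx : (x :: (m ++ [y])).length - 1 = m.length + 1 := by rw [hlenA]; omega
      by_cases h2 : |x - y| < 2
      · -- both stop at the outermost pair
        rw [calc_py, dif_neg h1, hx0, hylast, dif_pos h2]
        rw [calc_py_alt]
        simp only [hidx]
        rw [pvFind_break _ 0 (m.length + 1) (by omega) (by rw [g0, glast]; exact h2)]
        rw [g0, glast]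
        simp
      · -- strip the outer pair
        -- Pre_ forces at least one inner element
        have hm_ne : m ≠ [] := by
          rintro rfl
          rcases hparity with hodd | ⟨i, hi, hlt⟩
          · simp at hodd
          · have hi0 : i = 0 := by simpa using hi
            subst hi0
            simp [List.getD] at hlt
            omega
        have hm_pos : 0 < m.length := List.length_pos_iff.mpr hm_ne
        -- Pre_ descends to m
        have hPm : Pre_calc_py m := by
          refine ⟨hm_ne, ?_⟩
          rcases hparity with hodd | ⟨i, hi, hlt⟩
          · left; rw [hlenA] at hodd; omega
          · rw [hlenA] at hi
            have hi0 : i ≠ 0 := by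
              rintro rfl
              have e : (x :: (m ++ [y])).getD (m.length + 2 - 1 - 0) 0 = y := by
                have e' : m.length + 2 - 1 - 0 = m.length + 1 := by omega
                rw [e']; exact pv_getD_last x y m
              rw [hlenA, e] at hlt
              have : (x :: (m ++ [y])).getD 0 0 = x := rfl
              rw [this] at hlt
              omega
            right
            refine ⟨i - 1, by omega, ?_⟩
            have hi1 : i - 1 < m.length := by omega
            have e1 : (x :: (m ++ [y])).getD i 0 = m.getD (i - 1) 0 := by
              have e : i = (i - 1) + 1 := by omega
              rw [e]; exact pv_getD_mid x y m (i - 1) hi1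
            have hi2 : m.length - i < m.length := by omega
            have e2 : (x :: (m ++ [y])).getD ((x :: (m ++ [y])).length - 1 - i) 0
                = m.getD (m.length - 1 - (i - 1)) 0 := by
              have h3 : (x :: (m ++ [y])).length - 1 - i = (m.length - i) + 1 := by rw [hlenA]; omega
              have h4 : m.length - 1 - (i - 1) = m.length - i := by omega
              rw [h3, h4]; exact pv_getD_mid x y m (m.length - i) hi2
            rw [e1, e2] at hlt
            exact hlt
        -- A side
        rw [calc_py, dif_neg h1, hx0, hylast, dif_neg h2]
        have hslice : PySem.List.slice (x :: (m ++ [y])) (some 1) (some (-1)) = m := by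
          rw [pv_slice11]; simp
        rw [hslice]
        -- B side
        rw [calc_py_alt]
        simp only [hidx]
        rw [pvFind_step _ 0 (m.length + 1) (by omega) (by rw [g0, glast]; exact h2)]
        have e0 : (0 : Nat) + 1 = 1 := rfl
        have e1 : m.length + 1 - 1 = m.length := by omega
        rw [e0, e1]
        have hshift := pv_shift x y m m.length 0 (m.length - 1) (by omega) (by omega)
        have e2 : m.length - 1 + 1 = m.length := by omega
        rw [e0, e2] at hshift
        rw [hshift]
        rw [ih m (by rw [hlenA] at hlen; omega) hPm]
        -- dispatch on the inner result
        exact pv_dispatch m (pvFind m 0 (m.length - 1)) rfl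

-- ===== VERDICT (by name: the statement is the Claim_ definition above) =====
theorem calc_py_spec : Claim_equal_calc_py := by
  intro a _ hpre
  exact pv_main a.length a le_rfl hpre

theorem calc_py_raises : Claim_raises_calc_py := by
  unfold Claim_raises_calc_py
  refine ⟨?_, by decide, by decide, ?_⟩
  · rintro a _ ⟨hne, hev, hall⟩ ⟨_, hodd | ⟨i, hi, hlt⟩⟩
    · omega
    · exact hall i hi hlt
  · show calc_py_alt [0, 5] = 2
    rw [calc_py_alt]
    norm_num
    rw [pvFind_step ([0, 5] : List Int) 0 1 (by omega) (by decide)]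
    rw [pvFind_stop ([0, 5] : List Int) 1 0 (by omega)]
    decide

-- witness self-check: the raise-witness value pinned by Claim_raises_ is B's value there
theorem pv_raise_witness_ok : calc_py_alt pvRaiseWitness_calc_py = pvRaiseWitnessOut_calc_py :=
  calc_py_raises.2.2.2
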